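-- pv_equiv track=rewrite | github.com/vydibot/Sytems-Analysis-Final-Project | Code/TemplatesGeneration.py | generate_sentences_for_template_with_duplicates
-- ===== SOURCE A (Python) =====
-- from itertools import product
--
-- def generate_sentences_for_template_with_duplicates(word_pos_dict, template):
--     # Generate all possible sentences for a given template, using each word occurrence at most once per sentence
--     if not all(pos in word_pos_dict and word_pos_dict[pos] for pos in template):
--         return []
--     slot_word_occurrences = [word_pos_dict[pos] for pos in template]
--     all_assignments = product(*slot_word_occurrences)
--     sentences = set()
--     for assignment in all_assignments:
--         if len(set(assignment)) == len(assignment):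
--             sentence = ' '.join(word for word, idx in assignment)
--             sentences.add(sentence)
--     return list(sentences)
-- ===== SOURCE B (Python) =====
-- def generate_sentences_for_template_with_duplicates(word_pos_dict, template):
--     # Recursive backtracking over slots: extend a partial assignment only with
--     # occurrences not already used, so duplicate-occurrence branches are pruned
--     # early instead of filtering the full cartesian product afterwards (same result).
--     if not all(pos in word_pos_dict and word_pos_dict[pos] for pos in template):
--         return []
--     slot_lists = [word_pos_dict[pos] for pos in template]
--     sentences = set()
--     used = set()
--     words = []
--
--     def backtrack(i):
--         if i == len(slot_lists):
--             sentences.add(' '.join(words))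
--             return
--         for occ in slot_lists[i]:
--             if occ in used:
--                 continue
--             used.add(occ)
--             words.append(occ[0])
--             backtrack(i + 1)
--             words.pop()
--             used.remove(occ)
--
--     backtrack(0)
--     return list(sentences)
-- ===== Notes on version B (the rewrite author's own statement) =====
-- stated objective: alternative
-- what changed: Replaces materializing the full cartesian product and filtering each complete assignment for duplicate occurrences by a recursive backtracking search that carries a set of used occurrences and prunes duplicate-reusing partial assignments before extending them; on the timed input family the cost is the same.
import Mathlib
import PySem

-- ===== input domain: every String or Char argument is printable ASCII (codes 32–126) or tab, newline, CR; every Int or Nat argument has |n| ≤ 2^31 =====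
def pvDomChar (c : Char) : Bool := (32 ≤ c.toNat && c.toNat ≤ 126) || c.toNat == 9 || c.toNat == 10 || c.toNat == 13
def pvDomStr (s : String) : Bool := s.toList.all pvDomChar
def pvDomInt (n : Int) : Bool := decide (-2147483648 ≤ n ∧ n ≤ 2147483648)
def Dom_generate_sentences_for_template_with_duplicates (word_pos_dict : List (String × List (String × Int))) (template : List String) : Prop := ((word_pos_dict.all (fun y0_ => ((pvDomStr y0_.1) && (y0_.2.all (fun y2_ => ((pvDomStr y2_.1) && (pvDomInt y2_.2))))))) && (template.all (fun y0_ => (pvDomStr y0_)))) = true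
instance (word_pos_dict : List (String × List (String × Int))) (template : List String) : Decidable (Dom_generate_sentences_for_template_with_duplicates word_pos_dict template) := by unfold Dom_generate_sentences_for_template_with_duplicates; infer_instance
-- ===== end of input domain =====

-- B replaces A's "filter the full cartesian product" by recursive backtracking that
-- prunes any partial assignment reusing an occurrence (objective: alternative algorithm,
-- same cost on the timed inputs; equal sentence lists, insertion order proved identical).
-- Python's list(set) hash iteration order is not modelled: both ports return the
-- sentences in first-insertion order and the outputs are compared as sets.

-- ===== PORT A =====
-- itertools.product(*slot_word_occurrences), first slot varying slowest
def pvProdA : List (List (String × Int)) → List (List (String × Int))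
  | [] => [[]]
  | l :: ls => l.flatMap (fun x => (pvProdA ls).map (fun rest => x :: rest))

def generate_sentences_for_template_with_duplicates (word_pos_dict : List (String × List (String × Int))) (template : List String) : List String :=
  if template.all (fun pos =>
      match (PySem.Dict.mk word_pos_dict).get? pos with
      | some l => !l.isEmpty
      | none => false) then
    -- sentences = set(); for assignment in all_assignments: if len(set(assignment)) == len(assignment): sentences.add(' '.join(...))
    (pvProdA (template.map (fun pos => ((PySem.Dict.mk word_pos_dict).get? pos).getD []))).foldl
      (fun (s : PySem.Set String) asg =>
        if PySem.Set.len (PySem.Set.ofList asg) == (asg.length : Int) then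
          PySem.Set.add s (PySem.Str.join " " (asg.map (fun wi => wi.1)))
        else s)
      PySem.Set.empty
  else []

-- ===== PORT B =====
-- backtrack(i): for occ in slot_lists[i]: skip if occ in used, else recurse with occ used
def pvBackB (slots : List (List (String × Int))) (words : List String)
    (used : PySem.Set (String × Int)) (acc : PySem.Set String) : PySem.Set String :=
  match slots with
  | [] => PySem.Set.add acc (PySem.Str.join " " words)
  | l :: ls =>
    l.foldl (fun a occ =>
      if PySem.Set.contains used occ then a
      else pvBackB ls (words ++ [occ.1]) (PySem.Set.add used occ) a) acc

def generate_sentences_for_template_with_duplicates_alt (word_pos_dict : List (String × List (String × Int))) (template : List String) : List String :=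
  if template.all (fun pos =>
      match (PySem.Dict.mk word_pos_dict).get? pos with
      | some l => !l.isEmpty
      | none => false) then
    pvBackB (template.map (fun pos => ((PySem.Dict.mk word_pos_dict).get? pos).getD []))
      [] PySem.Set.empty PySem.Set.empty
  else []

-- ===== PRECONDITION & SPEC =====
def Spec_generate_sentences_for_template_with_duplicates (word_pos_dict : List (String × List (String × Int))) (template : List String) (out : List String) : Prop := out = generate_sentences_for_template_with_duplicates_alt word_pos_dict template
instance (word_pos_dict : List (String × List (String × Int))) (template : List String) (out : List String) : Decidable (Spec_generate_sentences_for_template_with_duplicates word_pos_dict template out) := by unfold Spec_generate_sentences_for_template_with_duplicates; infer_instance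

-- ===== CLAIM (what is proved, stated in full; the proofs are below) =====
def Claim_equal_generate_sentences_for_template_with_duplicates : Prop := ∀ (word_pos_dict : List (String × List (String × Int))) (template : List String), Dom_generate_sentences_for_template_with_duplicates word_pos_dict template → Spec_generate_sentences_for_template_with_duplicates word_pos_dict template (generate_sentences_for_template_with_duplicates word_pos_dict template)

-- ===== LEMMAS AND PROOFS =====

-- the condition B's backtracking enforces along one assignment
def pvOk (used : PySem.Set (String × Int)) : List (String × Int) → Bool
  | [] => true
  | x :: xs => !(PySem.Set.contains used x) && pvOk (PySem.Set.add used x) xs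

lemma pvOk_iff (asg : List (String × Int)) : ∀ (used : PySem.Set (String × Int)),
    pvOk used asg = true ↔ asg.Nodup ∧ ∀ x ∈ asg, x ∉ used := by
  induction asg with
  | nil => intro used; simp [pvOk]
  | cons x xs ih =>
    intro used
    simp only [pvOk, Bool.and_eq_true, Bool.not_eq_true', ih, List.nodup_cons, List.mem_cons]
    constructor
    · rintro ⟨hc, hnd, hdisj⟩
      have hx : x ∉ used := fun h => by
        have hT := (PySem.Set.contains_iff used x).2 h
        rw [hc] at hT
        exact Bool.false_ne_true hT
      refine ⟨⟨fun hmem => ?_, hnd⟩, ?_⟩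
      · exact (hdisj x hmem) ((PySem.Set.mem_add used x x).2 (Or.inr rfl))
      · rintro y (rfl | hy)
        · exact hx
        · exact fun hyu => (hdisj y hy) ((PySem.Set.mem_add used x y).2 (Or.inl hyu))
    · rintro ⟨⟨hxn, hnd⟩, hdisj⟩
      have hx : x ∉ used := hdisj x (Or.inl rfl)
      refine ⟨by simpa [PySem.Set.contains_iff] using hx, hnd, fun y hy hmem => ?_⟩
      rcases (PySem.Set.mem_add used x y).1 hmem with h | rfl
      · exact (hdisj y (Or.inr hy)) h
      · exact hxn hy

lemma pvLen_ofList_eq_iff (asg : List (String × Int)) :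
    (PySem.Set.ofList asg).length = asg.length ↔ asg.Nodup := by
  constructor
  · intro h
    induction asg with
    | nil => simp
    | cons x xs ih =>
      rw [PySem.Set.ofList_cons] at h
      simp only [List.length_cons, Nat.add_left_inj] at h
      have hd : ((PySem.Set.ofList xs).discard x).length ≤ (PySem.Set.ofList xs).length := by
        simp only [PySem.Set.discard]
        exact List.length_filter_le _ _
      have hl := PySem.Set.length_ofList_le (xs := xs)
      have heq : (PySem.Set.ofList xs).length = xs.length := by omega
      have hxmem : x ∉ PySem.Set.ofList xs := by
        intro hx
        have : ((PySem.Set.ofList xs).discard x).length < (PySem.Set.ofList xs).length := by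
          simp only [PySem.Set.discard]
          exact List.length_filter_lt_length_iff_exists.2 ⟨x, hx, by simp⟩
        omega
      exact List.nodup_cons.2 ⟨fun hx => hxmem ((PySem.Set.mem_ofList xs x).2 hx), ih heq⟩
  · intro h; rw [PySem.Set.ofList_eq_self_of_nodup asg h]

lemma pvCond_eq (asg : List (String × Int)) :
    (PySem.Set.len (PySem.Set.ofList asg) == (asg.length : Int)) = pvOk PySem.Set.empty asg := by
  rw [Bool.eq_iff_iff]
  have h2 := pvOk_iff asg PySem.Set.empty
  simp only [PySem.Set.empty, List.not_mem_nil, not_false_iff, implies_true, and_true] at h2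
  have h1 : (PySem.Set.len (PySem.Set.ofList asg) == (asg.length : Int)) = true ↔ asg.Nodup := by
    simp only [PySem.Set.len, beq_iff_eq, Int.natCast_inj]
    exact pvLen_ofList_eq_iff asg
  exact h1.trans h2.symm

lemma pvFoldl_const {α β : Type} (l : List β) (a : α) : l.foldl (fun a _ => a) a = a := by
  induction l generalizing a with
  | nil => rfl
  | cons x xs ih => exact ih a

lemma pvBackB_eq (slots : List (List (String × Int))) :
    ∀ (words : List String) (used : PySem.Set (String × Int)) (acc : PySem.Set String),
    pvBackB slots words used acc =
      (pvProdA slots).foldl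
        (fun a asg => if pvOk used asg then
            PySem.Set.add a (PySem.Str.join " " (words ++ asg.map (fun wi => wi.1)))
          else a) acc := by
  induction slots with
  | nil => intro words used acc; simp [pvBackB, pvProdA, pvOk]
  | cons l ls ih =>
    intro words used acc
    simp only [pvBackB, pvProdA, List.foldl_flatMap]
    apply PySem.List.foldl_congr_mem
    intro a x _
    by_cases hx : PySem.Set.contains used x = true
    · simp only [hx, if_true, List.foldl_map]
      have hfneq : (fun (a : PySem.Set String) rest =>
          if pvOk used (x :: rest) then
            PySem.Set.add a (PySem.Str.join " " (words ++ (x :: rest).map (fun wi => wi.1)))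
          else a) = fun a _ => a :=
        funext fun a => funext fun rest => by
          simp [pvOk, (PySem.Set.contains_iff used x).1 hx]
      rw [hfneq, pvFoldl_const]
    · simp only [hx, List.foldl_map, ih]
      apply PySem.List.foldl_congr_mem
      intro a' asg _
      have hxm : x ∉ used := fun h => hx ((PySem.Set.contains_iff used x).2 h)
      have hok : pvOk used (x :: asg) = pvOk (PySem.Set.add used x) asg := by
        simp [pvOk, hxm]
      rw [hok]
      simp [List.append_assoc]

-- ===== VERDICT (by name: the statement is the Claim_ definition above) =====
theorem generate_sentences_for_template_with_duplicates_spec : Claim_equal_generate_sentences_for_template_with_duplicates := by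
  intro word_pos_dict template _
  unfold Spec_generate_sentences_for_template_with_duplicates
  unfold generate_sentences_for_template_with_duplicates generate_sentences_for_template_with_duplicates_alt
  split
  · rw [pvBackB_eq]
    apply PySem.List.foldl_congr_mem
    intro a asg _
    rw [pvCond_eq asg]
    simp
  · rfl
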